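-- pv_equiv track=rewrite | github.com/JanEricNitschke/pymend | src/pymend/docstring_info.py | _split_bracketed_args
-- ===== SOURCE A (Python) =====
-- def _split_bracketed_args(inner: str) -> list[str] | None:
--     """Split comma-separated type args respecting nested square brackets.
--
--     Parameters
--     ----------
--     inner : str
--         The content between the outer brackets, e.g. for ``Generator[int, None, str]``
--         this would be ``"int, None, str"``.
--
--     Returns
--     -------
--     list[str] | None
--         List of stripped type argument strings, or None if the brackets
--         are unbalanced / malformed.
--     """
--     depth = 0
--     parts: list[str] = []
--     current: list[str] = []
--     for char in inner:
--         if char == "[":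
--             depth += 1
--         elif char == "]":
--             depth -= 1
--             if depth < 0:
--                 return None
--         elif char == "," and depth == 0:
--             parts.append("".join(current).strip())
--             current = []
--             continue
--         current.append(char)
--     if depth != 0:
--         return None
--     parts.append("".join(current).strip())
--     return parts
-- ===== SOURCE B (Python) =====
-- def _split_bracketed_args(inner):
--     depth = 0
--     cuts = []
--     for i, char in enumerate(inner):
--         if char == "[":
--             depth += 1
--         elif char == "]":
--             depth -= 1
--             if depth < 0:
--                 return None
--         elif char == "," and depth == 0:
--             cuts.append(i)
--     if depth != 0:
--         return None
--     bounds = [-1, *cuts, len(inner)]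
--     return [inner[a + 1:b].strip() for a, b in zip(bounds, bounds[1:])]
-- ===== Notes on version B (the rewrite author's own statement) =====
-- stated objective: alternative
-- what changed: B records top-level comma indices in one depth-tracking pass and then produces the parts by slicing the original string between consecutive boundaries, instead of accumulating characters into a growing current-segment buffer.
import Mathlib
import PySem

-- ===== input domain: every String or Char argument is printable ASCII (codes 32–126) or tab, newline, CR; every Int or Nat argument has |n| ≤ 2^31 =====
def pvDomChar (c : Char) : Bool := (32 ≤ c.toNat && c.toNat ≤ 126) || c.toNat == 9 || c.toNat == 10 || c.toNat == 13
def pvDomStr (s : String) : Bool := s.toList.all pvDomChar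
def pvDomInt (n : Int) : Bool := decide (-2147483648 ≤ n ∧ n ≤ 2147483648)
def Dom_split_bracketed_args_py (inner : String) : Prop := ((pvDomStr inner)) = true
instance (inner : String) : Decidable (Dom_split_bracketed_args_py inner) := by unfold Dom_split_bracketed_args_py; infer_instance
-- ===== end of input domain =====

-- B records the top-level comma indices and slices the original string between boundaries;
-- A accumulates the characters of the current segment. Same O(n) cost, different decomposition.

-- ===== PORT A =====
-- the for-loop of A, state (depth, parts, current); segments kept as List Char, String.ofList at the end
def goA : List Char → Int → List (List Char) → List Char → Option (List (List Char))
  | [], depth, parts, cur =>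
      if depth ≠ 0 then none else some (parts ++ [PySem.Chars.strip cur])
  | c :: rest, depth, parts, cur =>
      if c = '[' then goA rest (depth + 1) parts (cur ++ [c])
      else if c = ']' then
        if depth - 1 < 0 then none else goA rest (depth - 1) parts (cur ++ [c])
      else if c = ',' ∧ depth = 0 then goA rest depth (parts ++ [PySem.Chars.strip cur]) []
      else goA rest depth parts (cur ++ [c])

def split_bracketed_args_py (inner : String) : Option (List String) :=
  (goA inner.toList 0 [] []).map (List.map String.ofList)

-- ===== PORT B =====
-- first pass of Source B: for i, char in enumerate(inner), collecting top-level comma indices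
def goB : List Char → Nat → Int → List Nat → Option (List Nat)
  | [], _, depth, cuts => if depth ≠ 0 then none else some cuts
  | c :: rest, i, depth, cuts =>
      if c = '[' then goB rest (i + 1) (depth + 1) cuts
      else if c = ']' then
        if depth - 1 < 0 then none else goB rest (i + 1) (depth - 1) cuts
      else if c = ',' ∧ depth = 0 then goB rest (i + 1) depth (cuts ++ [i])
      else goB rest (i + 1) depth cuts

def split_bracketed_args_py_alt (inner : String) : Option (List String) :=
  let cs := inner.toList
  match goB cs 0 0 [] with
  | none => none
  | some cuts =>
      let bounds : List Int := -1 :: (cuts.map Int.ofNat ++ [(cs.length : Int)])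
      some ((bounds.zip bounds.tail).map (fun ab =>
        String.ofList (PySem.Chars.strip (PySem.List.slice cs (some (ab.1 + 1)) (some ab.2)))))

-- ===== PRECONDITION & SPEC =====
def Spec_split_bracketed_args_py (inner : String) (out : Option (List String)) : Prop := out = split_bracketed_args_py_alt inner
instance (inner : String) (out : Option (List String)) : Decidable (Spec_split_bracketed_args_py inner out) := by unfold Spec_split_bracketed_args_py; infer_instance

-- ===== CLAIM (what is proved, stated in full; the proofs are below) =====
def Claim_equal_split_bracketed_args_py : Prop := ∀ (inner : String), Dom_split_bracketed_args_py inner → Spec_split_bracketed_args_py inner (split_bracketed_args_py inner)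

-- ===== LEMMAS AND PROOFS =====

-- segments determined by cut positions, expressed on the current buffer and the remaining suffix
def segs : List Char → List Char → List Nat → Nat → List (List Char)
  | cur, cs, [], _ => [PySem.Chars.strip (cur ++ cs)]
  | cur, cs, c :: rest, i =>
      PySem.Chars.strip (cur ++ cs.take (c - i)) :: segs [] (cs.drop (c - i + 1)) rest (c + 1)

lemma goB_append (cs : List Char) : ∀ (i : Nat) (d : Int) (acc : List Nat),
    goB cs i d acc = (goB cs i d []).map (acc ++ ·) := by
  induction cs with
  | nil => intro i d acc; simp only [goB]; split_ifs <;> simp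
  | cons c rest ih =>
    intro i d acc
    simp only [goB]
    split_ifs with h1 h2 h3 h4
    · exact ih _ _ _
    · rfl
    · exact ih _ _ _
    · rw [ih _ _ (acc ++ [i])]
      simp only [List.nil_append]
      rw [ih _ _ [i], Option.map_map]
      have : (fun x => acc ++ [i] ++ x) = ((fun x => acc ++ x) ∘ fun x : List Nat => [i] ++ x) :=
        funext fun x => by simp
      rw [this]
    · exact ih _ _ _

lemma goB_bounds (cs : List Char) : ∀ (i : Nat) (d : Int) (cuts : List Nat),
    goB cs i d [] = some cuts → (∀ x ∈ cuts, i ≤ x) ∧ cuts.Pairwise (· < ·) := by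
  induction cs with
  | nil =>
    intro i d cuts h
    simp [goB] at h
    rcases h with ⟨-, h⟩; subst h; simp
  | cons c rest ih =>
    intro i d cuts h
    simp only [goB] at h
    split_ifs at h with h1 h2 h3 h4
    · exact ⟨fun x hx => le_trans (by omega) ((ih _ _ _ h).1 x hx), (ih _ _ _ h).2⟩
    · exact ⟨fun x hx => le_trans (by omega) ((ih _ _ _ h).1 x hx), (ih _ _ _ h).2⟩
    · rw [goB_append] at h
      cases hres : goB rest (i + 1) d [] with
      | none => simp [hres] at h
      | some cuts' =>
        simp [hres] at h
        subst h
        obtain ⟨hge, hpw⟩ := ih _ _ _ hres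
        constructor
        · intro x hx
          rcases List.mem_cons.mp hx with rfl | hx
          · exact le_refl _
          · exact le_trans (by omega) (hge x hx)
        · exact List.pairwise_cons.mpr ⟨fun x hx => by have := hge x hx; omega, hpw⟩
    · exact ⟨fun x hx => le_trans (by omega) ((ih _ _ _ h).1 x hx), (ih _ _ _ h).2⟩

lemma segs_shift (cuts : List Nat) (cur : List Char) (c : Char) (rest : List Char) (i : Nat)
    (h : ∀ x ∈ cuts, i + 1 ≤ x) :
    segs cur (c :: rest) cuts i = segs (cur ++ [c]) rest cuts (i + 1) := by
  cases cuts with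
  | nil => simp [segs]
  | cons c' rest' =>
    have hc' : i + 1 ≤ c' := h c' (by simp)
    have h1 : c' - i = (c' - (i + 1)) + 1 := by omega
    simp only [segs, h1, List.take_succ_cons, List.drop_succ_cons]
    simp [List.append_assoc]

lemma goA_eq_goB (cs : List Char) : ∀ (depth : Int) (parts : List (List Char)) (cur : List Char) (i : Nat),
    0 ≤ depth →
    goA cs depth parts cur = (goB cs i depth []).map (fun cuts => parts ++ segs cur cs cuts i) := by
  induction cs with
  | nil =>
    intro depth parts cur i hd
    simp only [goA, goB]
    split_ifs with h <;> simp [segs]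
  | cons c rest ih =>
    intro depth parts cur i hd
    simp only [goA, goB]
    split_ifs with h1 h2 h3 h4
    · -- '['
      rw [ih (depth + 1) parts (cur ++ [c]) (i + 1) (by omega)]
      cases hres : goB rest (i + 1) (depth + 1) [] with
      | none => simp
      | some cuts =>
        obtain ⟨hge, -⟩ := goB_bounds rest _ _ _ hres
        simp [segs_shift cuts cur c rest i hge]
    · -- ']', depth would go negative
      rfl
    · -- ']'
      rw [ih (depth - 1) parts (cur ++ [c]) (i + 1) (by omega)]
      cases hres : goB rest (i + 1) (depth - 1) [] with
      | none => simp
      | some cuts =>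
        obtain ⟨hge, -⟩ := goB_bounds rest _ _ _ hres
        simp [segs_shift cuts cur c rest i hge]
    · -- top-level comma
      rw [ih depth (parts ++ [PySem.Chars.strip cur]) [] (i + 1) hd]
      simp only [List.nil_append]
      rw [goB_append rest (i + 1) depth [i]]
      cases hres : goB rest (i + 1) depth [] with
      | none => simp
      | some cuts =>
        simp only [hres, Option.map_map, Option.map_some]
        congr 1
        have : segs cur (c :: rest) (i :: cuts) i
            = PySem.Chars.strip cur :: segs [] rest cuts (i + 1) := by
          simp [segs]
        simp [this]
    · -- ordinary character
      rw [ih depth parts (cur ++ [c]) (i + 1) hd]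
      cases hres : goB rest (i + 1) depth [] with
      | none => simp
      | some cuts =>
        obtain ⟨hge, -⟩ := goB_bounds rest _ _ _ hres
        simp [segs_shift cuts cur c rest i hge]

lemma slices_eq_segs (full : List Char) (cuts : List Nat) : ∀ (i : Nat),
    (∀ x ∈ cuts, i ≤ x) → cuts.Pairwise (· < ·) →
    (((((i : Int) - 1) :: (cuts.map Int.ofNat ++ [(full.length : Int)])).zip
        (cuts.map Int.ofNat ++ [(full.length : Int)])).map (fun ab =>
      PySem.Chars.strip (PySem.List.slice full (some (ab.1 + 1)) (some ab.2))))
    = segs [] (full.drop i) cuts i := by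
  induction cuts with
  | nil =>
    intro i _ _
    have : ((i : Int) - 1 + 1) = (i : Int) := by ring
    simp only [List.map_nil, List.nil_append, List.zip_cons_cons, List.zip_nil_right,
      List.map_cons, List.map_nil, this, segs]
    rw [PySem.List.slice_toNat _ (Int.natCast_nonneg i) (Int.natCast_nonneg full.length)]
    simp [List.take_of_length_le]
  | cons c rest ih =>
    intro i hge hpw
    simp only [Int.ofNat_eq_natCast] at ih
    have hci : i ≤ c := hge c (by simp)
    obtain ⟨hlt, hpw'⟩ := List.pairwise_cons.mp hpw
    have hrest : ∀ x ∈ rest, c + 1 ≤ x := fun x hx => hlt x hx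
    simp only [List.map_cons, List.cons_append, List.zip_cons_cons, Int.ofNat_eq_natCast, segs]
    congr 1
    · have : ((i : Int) - 1 + 1) = (i : Int) := by ring
      rw [this, PySem.List.slice_toNat _ (Int.natCast_nonneg i) (Int.natCast_nonneg c)]
      simp
    · have := ih (c + 1) hrest hpw'
      have hc1 : ((c + 1 : Nat) : Int) - 1 = (c : Int) := by push_cast; ring
      rw [hc1] at this
      rw [this]
      congr 1
      rw [List.drop_drop]
      congr 1
      omega

-- ===== VERDICT (by name: the statement is the Claim_ definition above) =====
theorem split_bracketed_args_py_spec : Claim_equal_split_bracketed_args_py := by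
  intro inner _
  unfold Spec_split_bracketed_args_py split_bracketed_args_py split_bracketed_args_py_alt
  rw [goA_eq_goB inner.toList 0 [] [] 0 (le_refl 0)]
  cases hres : goB inner.toList 0 0 [] with
  | none => simp only [hres, Option.map_none]
  | some cuts =>
    obtain ⟨-, hpw⟩ := goB_bounds inner.toList _ _ _ hres
    simp only [hres, Option.map_some, List.nil_append, List.tail_cons]
    have h := slices_eq_segs inner.toList cuts 0 (fun x _ => Nat.zero_le x) hpw
    have h0 : ((0 : Nat) : Int) - 1 = (-1 : Int) := by norm_num
    rw [h0, List.drop_zero] at h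
    rw [← h, List.map_map]
    rfl
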